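-- pv_equiv track=rewrite | github.com/OmniNode-ai/omnibase_core | scripts/validation/validate-string-versions.py | _is_semantic_version_ast
-- ===== SOURCE A (Python) =====
-- def _is_semantic_version_ast(value: str) -> bool:
--     """
--     Use AST-inspired logic to detect semantic versions.
--
--     Checks if a string matches the semantic version pattern X.Y.Z
--     where X, Y, Z are integers.
--     """
--     if not isinstance(value, str) or not value:
--         return False
--
--     # Handle the most common patterns
--     if "." not in value:
--         return False
--
--     # Split on dots and validate each part
--     parts = value.split(".")
--
--     # Must be exactly 3 parts for semantic versioning
--     if len(parts) != 3:
--         return False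
--
--     # Each part must be a valid integer (possibly with leading zeros)
--     try:
--         for part in parts:
--             # Must be numeric and not empty
--             if not part or not part.isdigit():
--                 return False
--             # Convert to int to validate (handles leading zeros)
--             int(part)
--         return True
--     except (ValueError, TypeError):
--         return False
-- ===== SOURCE B (Python) =====
-- def _is_semantic_version_ast(value: str) -> bool:
--     """Single left-to-right scan: count dots, track current digit-run length."""
--     if not isinstance(value, str):
--         return False
--     dots = 0
--     run = 0
--     for ch in value:
--         if ch == '.':
--             if run == 0:
--                 return False
--             dots += 1
--             run = 0
--         elif '0' <= ch <= '9':
--             run += 1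
--         else:
--             return False
--     return dots == 2 and run > 0
-- ===== Notes on version B (the rewrite author's own statement) =====
-- stated objective: simpler
-- what changed: replaced A's split-on-dots + per-part isdigit()/int() validation (with try/except) by a single left-to-right scan that counts dots and the length of the current digit run
import Mathlib
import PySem

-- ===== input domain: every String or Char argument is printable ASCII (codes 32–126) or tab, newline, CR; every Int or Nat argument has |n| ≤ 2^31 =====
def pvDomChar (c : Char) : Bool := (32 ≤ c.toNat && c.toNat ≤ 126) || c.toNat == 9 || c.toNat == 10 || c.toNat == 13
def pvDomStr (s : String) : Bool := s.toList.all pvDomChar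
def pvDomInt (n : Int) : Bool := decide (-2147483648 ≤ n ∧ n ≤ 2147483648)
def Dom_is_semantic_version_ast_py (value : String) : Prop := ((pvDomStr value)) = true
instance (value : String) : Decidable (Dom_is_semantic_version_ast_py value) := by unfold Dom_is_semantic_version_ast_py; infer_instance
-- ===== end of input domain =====

-- B replaces A's split-into-parts + per-part isdigit/int() validation by one left-to-right scan
-- (counting dots and the current digit-run length); same return value, different decomposition.

-- ===== PORT A =====
-- int(part) is ported BY HAND below (pyInt?): PySem.Int.ofChars? covers int(s) but its parser is a
-- private definition with no usable lemmas; pyInt? mirrors CPython's int() grammar step for step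
-- (strip int-whitespace, optional sign, digits with single '_' separators) and is exact on the
-- ASCII domain these theorems are about.
def pyIntSpace (c : Char) : Bool :=
  c = ' ' || c = '\t' || c = '\n' || c = '\r' || c = '\x0b' || c = '\x0c'

def pyIntDigitsGo : List Char → Bool → Nat → Option Nat
  | [], afterDigit, acc => if afterDigit then some acc else none
  | c :: rest, afterDigit, acc =>
    if c.isDigit then pyIntDigitsGo rest true (acc * 10 + (c.toNat - '0'.toNat))
    else if c = '_' ∧ afterDigit then
      match rest with
      | d :: _ => if d.isDigit then pyIntDigitsGo rest false acc else none
      | [] => none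
    else none

def pyIntVal? : List Char → Option Nat
  | [] => none
  | cs => pyIntDigitsGo cs false 0

def pyInt? (s : List Char) : Option Int :=
  let cs := ((s.dropWhile pyIntSpace).reverse.dropWhile pyIntSpace).reverse
  match cs with
  | '-' :: ds => (pyIntVal? ds).map (fun n => -(n : Int))
  | '+' :: ds => (pyIntVal? ds).map (fun n => (n : Int))
  | ds => (pyIntVal? ds).map (fun n => (n : Int))

-- the for-loop over parts inside A's try: ... except: return False
def checkPartsA : List (List Char) → Bool
  | [] => true
  | p :: ps =>
    if p.isEmpty || !PySem.Chars.strIsdigit p then false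
    else
      match pyInt? p with
      | none => false      -- int(part) raised ValueError: caught, return False
      | some _ => checkPartsA ps

def is_semantic_version_ast_py (value : String) : Bool :=
  if value.toList.isEmpty then false
  else if !PySem.Str.isIn "." value then false
  else
    let parts := PySem.Chars.splitOn value.toList ['.']
    if parts.length ≠ 3 then false
    else checkPartsA parts

-- ===== PORT B =====
def scanB : List Char → Nat → Nat → Bool
  | [], dots, run => decide (dots = 2) && decide (0 < run)
  | c :: cs, dots, run =>
    if c = '.' then
      if run = 0 then false else scanB cs (dots + 1) 0
    else if '0' ≤ c ∧ c ≤ '9' then scanB cs dots (run + 1)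
    else false

def is_semantic_version_ast_py_alt (value : String) : Bool :=
  scanB value.toList 0 0

-- ===== PRECONDITION & SPEC =====
def Spec_is_semantic_version_ast_py (value : String) (out : Bool) : Prop := out = is_semantic_version_ast_py_alt value
instance (value : String) (out : Bool) : Decidable (Spec_is_semantic_version_ast_py value out) := by unfold Spec_is_semantic_version_ast_py; infer_instance

-- ===== CLAIM (what is proved, stated in full; the proofs are below) =====
def Claim_equal_is_semantic_version_ast_py : Prop := ∀ (value : String), Dom_is_semantic_version_ast_py value → Spec_is_semantic_version_ast_py value (is_semantic_version_ast_py value)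

-- ===== LEMMAS AND PROOFS =====

theorem modifyHead_idfun {α : Type} (L : List α) : L.modifyHead (fun x => x) = L := by
  cases L <;> simp

-- reference splitting of a char list on '.'
def split1 : List Char → List (List Char)
  | [] => [[]]
  | c :: t => if c = '.' then [] :: split1 t else (split1 t).modifyHead (c :: ·)

theorem split1_ne_nil (cs : List Char) : split1 cs ≠ [] := by
  induction cs with
  | nil => simp [split1]
  | cons c t ih =>
    simp only [split1]
    split_ifs
    · simp
    · cases h : split1 t with
      | nil => exact absurd h ih
      | cons a l => simp

theorem split1_length (cs : List Char) : (split1 cs).length = cs.count '.' + 1 := by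
  induction cs with
  | nil => simp [split1]
  | cons c t ih =>
    simp only [split1]
    split_ifs with hc
    · subst hc; simp [ih]
    · simp [List.length_modifyHead, ih, hc]

theorem splitOn_go_dot (l : List Char) : ∀ (fuel : Nat) (cur : List Char) (acc : List (List Char)),
    l.length < fuel →
    PySem.Chars.splitOn.go ['.'] fuel l cur acc
      = acc.reverse ++ (split1 l).modifyHead (cur.reverse ++ ·) := by
  induction l with
  | nil =>
    intro fuel cur acc hlt
    cases fuel with
    | zero => omega
    | succ f => simp [PySem.Chars.splitOn.go, split1]
  | cons c rest ih =>
    intro fuel cur acc hlt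
    cases fuel with
    | zero => omega
    | succ f =>
      by_cases hc : c = '.'
      · subst hc
        have hpre : List.isPrefixOf ['.'] ('.' :: rest) = true := by simp [List.isPrefixOf]
        simp only [PySem.Chars.splitOn.go, hpre, if_true, List.length_cons,
          List.length_nil, List.drop_succ_cons, List.drop_zero]
        rw [ih f [] ((cur.reverse) :: acc) (by simpa using hlt)]
        simp [split1, modifyHead_idfun]
      · have hpre : List.isPrefixOf ['.'] (c :: rest) = false := by
          simp [List.isPrefixOf]; exact fun h => absurd h.symm hc
        simp only [PySem.Chars.splitOn.go, hpre]
        rw [ih f (c :: cur) acc (by simpa using hlt)]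
        simp only [split1, if_neg hc]
        cases h : split1 rest with
        | nil => exact absurd h (split1_ne_nil rest)
        | cons a l => simp

theorem splitOn_eq_split1 (cs : List Char) : PySem.Chars.splitOn cs ['.'] = split1 cs := by
  show PySem.Chars.splitOn.go ['.'] (cs.length + 1) cs [] [] = split1 cs
  rw [splitOn_go_dot cs (cs.length + 1) [] [] (by omega)]
  cases h : split1 cs with
  | nil => exact absurd h (split1_ne_nil cs)
  | cons a l => simp

-- int() succeeds on a nonempty all-digit string
theorem pyIntDigitsGo_digits (l : List Char) (h : ∀ c ∈ l, PySem.Chars.isdigit c) :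
    ∀ acc, ∃ n, pyIntDigitsGo l true acc = some n := by
  induction l with
  | nil => intro acc; exact ⟨acc, rfl⟩
  | cons c t ih =>
    intro acc
    have hc : c.isDigit := by
      have := h c (by simp)
      simp only [PySem.Chars.isdigit, Char.le_def, Bool.and_eq_true, decide_eq_true_eq] at this
      simp only [Char.isDigit, Bool.and_eq_true, decide_eq_true_eq]
      exact this
    simp only [pyIntDigitsGo, if_pos hc]
    exact ih (fun c hc => h c (List.mem_cons_of_mem _ hc)) _

theorem pyInt?_digits (p : List Char) (hne : p ≠ [])
    (h : ∀ c ∈ p, PySem.Chars.isdigit c) : ∃ n, pyInt? p = some n := by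
  obtain ⟨d, ds, rfl⟩ := List.exists_cons_of_ne_nil hne
  have hnospace : ∀ c ∈ d :: ds, pyIntSpace c = false := by
    intro c hc
    have hv := h c hc
    simp only [PySem.Chars.isdigit, Char.le_def, Bool.and_eq_true, decide_eq_true_eq] at hv
    simp only [pyIntSpace, Bool.or_eq_false_iff, decide_eq_false_iff_not]
    refine ⟨⟨⟨⟨⟨?_, ?_⟩, ?_⟩, ?_⟩, ?_⟩, ?_⟩ <;> (intro hc'; subst hc'; exact absurd hv (by decide))
  have h1 : (d :: ds).dropWhile pyIntSpace = d :: ds := by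
    rw [List.dropWhile_eq_self_iff]
    intro hlt
    simpa using hnospace _ (List.getElem_mem hlt)
  have h2 : (d :: ds).reverse.dropWhile pyIntSpace = (d :: ds).reverse := by
    rw [List.dropWhile_eq_self_iff]
    intro hlt
    simpa using hnospace _ (List.mem_reverse.mp (List.getElem_mem hlt))
  have hd := h d (by simp)
  simp [PySem.Chars.isdigit, Char.le_def] at hd
  simp only [pyInt?, h1, h2, List.reverse_reverse]
  have hdm : d ≠ '-' := by intro hc; subst hc; simp at hd
  have hdp : d ≠ '+' := by intro hc; subst hc; simp at hd
  split
  · next heq => injection heq with h' _; exact absurd h' hdm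
  · next heq => injection heq with h' _; exact absurd h' hdp
  · next =>
    have hdig : d.isDigit := by simp [Char.isDigit]; omega
    simp only [pyIntVal?, pyIntDigitsGo, if_pos hdig]
    obtain ⟨n, hn⟩ := pyIntDigitsGo_digits ds
      (fun c hc => h c (List.mem_cons_of_mem _ hc)) (0 * 10 + (d.toNat - '0'.toNat))
    have h0 : '0'.toNat = 48 := rfl
    rw [h0] at hn
    simp only [Nat.zero_mul, Nat.zero_add] at hn
    exact ⟨n, by simp [hn]⟩

theorem checkPartsA_eq (ps : List (List Char)) :
    checkPartsA ps = ps.all (fun p => !p.isEmpty && PySem.Chars.strIsdigit p) := by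
  induction ps with
  | nil => rfl
  | cons p t ih =>
    simp only [checkPartsA, List.all_cons]
    by_cases hg : p.isEmpty = true ∨ PySem.Chars.strIsdigit p = false
    · have : (p.isEmpty || !PySem.Chars.strIsdigit p) = true := by
        rcases hg with h | h <;> simp [h]
      rw [if_pos this]
      rcases hg with h | h <;> simp [h]
    · rw [not_or] at hg
      obtain ⟨hne, hdig⟩ := hg
      have hne' : p.isEmpty = false := by simpa using hne
      have hdig' : PySem.Chars.strIsdigit p = true := by simpa using hdig
      rw [if_neg (by simp [hne', hdig'])]
      have hall : ∀ c ∈ p, PySem.Chars.isdigit c := by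
        have := hdig'
        simp [PySem.Chars.strIsdigit, List.all_eq_true] at this
        exact this.2
      obtain ⟨n, hn⟩ := pyInt?_digits p (by simpa [List.isEmpty_iff] using hne') hall
      rw [hn]
      simp [hne', hdig', ih]

-- characterization of A
theorem portA_eq (value : String) :
    is_semantic_version_ast_py value =
      (decide ((split1 value.toList).length = 3)
        && (split1 value.toList).all (fun p => !p.isEmpty && PySem.Chars.strIsdigit p)) := by
  unfold is_semantic_version_ast_py
  by_cases hnil : value.toList = []
  · rw [hnil]; simp [split1]
  · rw [if_neg (by simpa [List.isEmpty_iff] using hnil)]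
    by_cases hdot : '.' ∈ value.toList
    · have hin : PySem.Str.isIn "." value = true := by
        rw [PySem.Str.isIn_iff_infix]
        obtain ⟨s, t, hst⟩ := List.append_of_mem hdot
        have hdl : ".".toList = ['.'] := by decide
        exact ⟨s, t, by rw [hst, hdl]; simp⟩
      rw [hin]
      simp only [Bool.not_true, Bool.false_eq_true, if_false]
      rw [splitOn_eq_split1, checkPartsA_eq]
      by_cases hlen : (split1 value.toList).length = 3
      · rw [if_neg (by simp [hlen])]
        simp [hlen]
      · rw [if_pos (by simpa using hlen)]
        simp [hlen]
    · have hin : PySem.Str.isIn "." value = false := by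
        rw [← Bool.not_eq_true, PySem.Str.isIn_iff_infix]
        rintro ⟨s, t, hst⟩
        exact hdot (by rw [← hst]; simp)
      rw [hin]
      have : (split1 value.toList).length = 1 := by
        rw [split1_length, List.count_eq_zero_of_not_mem hdot]
      simp [this]

-- characterization of B
theorem scanB_spec (cs : List Char) : ∀ (dots run : Nat),
    scanB cs dots run =
      (decide (dots + (split1 cs).length = 3)
        && (split1 cs).all (fun p => p.all PySem.Chars.isdigit)
        && (split1 cs).tail.all (fun p => !p.isEmpty)
        && (decide (0 < run) || !(split1 cs).headI.isEmpty)) := by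
  induction cs with
  | nil =>
    intro dots run
    have h3 : (dots + 1 = 3) ↔ (dots = 2) := by omega
    simp [scanB, split1, h3]
  | cons c t ih =>
    intro dots run
    obtain ⟨h, tt, hsp⟩ : ∃ h tt, split1 t = h :: tt := by
      cases hs : split1 t with
      | nil => exact absurd hs (split1_ne_nil t)
      | cons a l => exact ⟨a, l, rfl⟩
    by_cases hc : c = '.'
    · subst hc
      simp only [scanB, split1, if_pos]
      by_cases hrun : run = 0
      · subst hrun; simp
      · rw [if_neg hrun, ih (dots + 1) 0, hsp]
        have h3 : (dots + 1 + (h :: tt).length = 3) ↔ (dots + ([] :: h :: tt).length = 3) := by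
          simp; omega
        simp only [decide_eq_decide.mpr h3]
        simp [Nat.pos_of_ne_zero hrun]
        by_cases hd : (dots + (tt.length + 1 + 1) = 3) <;>
          simp [hd, Bool.and_comm, Bool.and_left_comm, Bool.and_assoc]
    · rw [show scanB (c :: t) dots run
            = (if '0' ≤ c ∧ c ≤ '9' then scanB t dots (run + 1) else false) by
          simp [scanB, hc]]
      simp only [split1, if_neg hc, hsp, List.modifyHead_cons]
      by_cases hdig : '0' ≤ c ∧ c ≤ '9'
      · rw [if_pos hdig, ih dots (run + 1), hsp]
        have hcd : PySem.Chars.isdigit c = true := by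
          simp [PySem.Chars.isdigit]; exact hdig
        simp [hcd]
        by_cases h1 : (dots + (tt.length + 1) = 3) <;>
          simp [h1, Bool.and_assoc]
      · rw [if_neg hdig]
        have hcd : PySem.Chars.isdigit c = false := by
          simp [PySem.Chars.isdigit] at hdig ⊢
          tauto
        simp [hcd]

theorem all_and_split (l : List (List Char)) (p q : List Char → Bool) :
    l.all (fun x => p x && q x) = (l.all p && l.all q) := by
  induction l with
  | nil => rfl
  | cons a t ih => simp only [List.all_cons, ih]; cases p a <;> cases q a <;> simp

-- ===== VERDICT (by name: the statement is the Claim_ definition above) =====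
theorem is_semantic_version_ast_py_spec : Claim_equal_is_semantic_version_ast_py := by
  intro value _
  unfold Spec_is_semantic_version_ast_py
  rw [portA_eq, is_semantic_version_ast_py_alt, scanB_spec]
  obtain ⟨h, tt, hsp⟩ : ∃ h tt, split1 value.toList = h :: tt := by
    cases hs : split1 value.toList with
    | nil => exact absurd hs (split1_ne_nil value.toList)
    | cons a l => exact ⟨a, l, rfl⟩
  rw [hsp]
  simp only [PySem.Chars.strIsdigit, List.all_cons, List.length_cons, Nat.zero_add,
    List.tail_cons, List.headI, Bool.and_assoc]
  rw [all_and_split]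
  by_cases h1 : (tt.length + 1 = 3) <;> simp [h1] ;
    cases hhe : h.isEmpty <;> simp [List.isEmpty_iff] at hhe <;>
      simp [hhe, all_and_split, Bool.and_comm, Bool.and_left_comm, Bool.and_self]
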